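-- pv_equiv track=rewrite | github.com/spotpan/GANN | strongtie_visualization.py | get_strong_tie_distribution
-- ===== SOURCE A (Python) =====
-- def get_strong_tie_distribution(roles, strong_tie_nodes):
--     """Calculate total nodes and strong ties for each role."""
--     total_distribution = {}
--     strong_tie_distribution = {}
--
--     for role, nodes in roles.items():
--         total_count = len(nodes)
--         strong_tie_count = len(set(nodes) & strong_tie_nodes)  # Strong ties in this role
--
--         total_distribution[role] = total_count
--         strong_tie_distribution[role] = strong_tie_count
--
--     return total_distribution, strong_tie_distribution
-- ===== SOURCE B (Python) =====
-- def get_strong_tie_distribution(roles, strong_tie_nodes):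
--     """Same result computed the other way round: seed every role's strong-tie
--     count at 0, then make one pass over the strong-tie nodes and credit each
--     node to every role whose list contains it (no per-role set intersection)."""
--     total_distribution = {role: len(nodes) for role, nodes in roles.items()}
--     strong_tie_distribution = dict.fromkeys(roles, 0)
--     for node in strong_tie_nodes:
--         for role, nodes in roles.items():
--             if node in nodes:
--                 strong_tie_distribution[role] += 1
--     return total_distribution, strong_tie_distribution
-- ===== Notes on version B (the rewrite author's own statement) =====
-- stated objective: alternative
-- what changed: Instead of building set(nodes) and intersecting it with strong_tie_nodes per role, B pre-seeds every role's count at 0 and accumulates in a pass over the strong-tie nodes, crediting each strong node to every role whose list contains it.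
import Mathlib
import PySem

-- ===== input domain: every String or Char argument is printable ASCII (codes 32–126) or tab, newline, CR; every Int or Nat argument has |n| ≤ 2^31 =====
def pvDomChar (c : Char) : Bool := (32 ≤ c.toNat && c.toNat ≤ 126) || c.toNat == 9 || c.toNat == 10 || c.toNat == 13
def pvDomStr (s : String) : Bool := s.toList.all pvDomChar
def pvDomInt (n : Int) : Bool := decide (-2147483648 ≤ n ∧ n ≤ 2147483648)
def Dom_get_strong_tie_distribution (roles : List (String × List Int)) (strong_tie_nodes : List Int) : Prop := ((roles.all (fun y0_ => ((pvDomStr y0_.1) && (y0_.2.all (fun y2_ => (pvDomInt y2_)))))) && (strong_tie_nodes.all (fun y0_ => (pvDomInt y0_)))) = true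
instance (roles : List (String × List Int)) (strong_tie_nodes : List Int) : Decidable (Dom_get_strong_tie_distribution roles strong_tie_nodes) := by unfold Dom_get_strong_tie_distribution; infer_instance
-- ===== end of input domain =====

-- B replaces the per-role set intersection by pre-seeded zero counts accumulated in one
-- pass over the strong-tie nodes; same return value (an alternative decomposition, not faster).

-- ===== PORT A =====
def get_strong_tie_distribution (roles : List (String × List Int)) (strong_tie_nodes : List Int) : (List (String × Int)) × (List (String × Int)) :=
  -- total_distribution = {}; strong_tie_distribution = {}; one loop over roles.items()
  let dicts := roles.foldl
    (fun (acc : PySem.Dict String Int × PySem.Dict String Int) p =>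
      let total_count : Int := (p.2.length : Int)
      let strong_tie_count : Int := PySem.Set.len (PySem.Set.inter (PySem.Set.ofList p.2) strong_tie_nodes)
      (acc.1.insert p.1 total_count, acc.2.insert p.1 strong_tie_count))
    (PySem.Dict.empty, PySem.Dict.empty)
  (dicts.1.items, dicts.2.items)

-- ===== PORT B =====
def get_strong_tie_distribution_alt (roles : List (String × List Int)) (strong_tie_nodes : List Int) : (List (String × Int)) × (List (String × Int)) :=
  -- total_distribution = {role: len(nodes) for role, nodes in roles.items()}
  let total_distribution := roles.foldl
    (fun (d : PySem.Dict String Int) p => d.insert p.1 (p.2.length : Int)) PySem.Dict.empty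
  -- strong_tie_distribution = dict.fromkeys(roles, 0)
  let seeded := roles.foldl
    (fun (d : PySem.Dict String Int) p => d.insert p.1 (0 : Int)) PySem.Dict.empty
  -- for node in strong_tie_nodes: for role, nodes in roles.items(): if node in nodes: d[role] += 1
  -- (the key is always present, seeded above, so 'd[role] += 1' is exactly Dict.modify with default 0)
  let strong_tie_distribution := strong_tie_nodes.foldl
    (fun (d : PySem.Dict String Int) node =>
      roles.foldl
        (fun (d : PySem.Dict String Int) p =>
          if node ∈ p.2 then d.modify p.1 0 (· + 1) else d) d)
    seeded
  (total_distribution.items, strong_tie_distribution.items)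

-- ===== PRECONDITION & SPEC =====
-- Pre_ excludes only inputs that no Python call can produce: 'roles' is a dict (its keys are
-- distinct) and 'strong_tie_nodes' is a set (its elements are distinct); on duplicate role keys
-- or duplicate strong nodes the list encodings of A and B may disagree.
def Pre_get_strong_tie_distribution (roles : List (String × List Int)) (strong_tie_nodes : List Int) : Prop :=
  (roles.map Prod.fst).Nodup ∧ strong_tie_nodes.Nodup
instance (roles : List (String × List Int)) (strong_tie_nodes : List Int) : Decidable (Pre_get_strong_tie_distribution roles strong_tie_nodes) := by unfold Pre_get_strong_tie_distribution; infer_instance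

def pvWitness_get_strong_tie_distribution : (List (String × List Int)) × List Int :=
  ([("a", [1, 2, 2]), ("b", [2, 3])], [2, 3, 7])

def Spec_get_strong_tie_distribution (roles : List (String × List Int)) (strong_tie_nodes : List Int) (out : (List (String × Int)) × (List (String × Int))) : Prop := out = get_strong_tie_distribution_alt roles strong_tie_nodes
instance (roles : List (String × List Int)) (strong_tie_nodes : List Int) (out : (List (String × Int)) × (List (String × Int))) : Decidable (Spec_get_strong_tie_distribution roles strong_tie_nodes out) := by unfold Spec_get_strong_tie_distribution; infer_instance

-- ===== CLAIM (what is proved, stated in full; the proofs are below) =====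
def Claim_equal_get_strong_tie_distribution : Prop := ∀ (roles : List (String × List Int)) (strong_tie_nodes : List Int), Dom_get_strong_tie_distribution roles strong_tie_nodes → Pre_get_strong_tie_distribution roles strong_tie_nodes → Spec_get_strong_tie_distribution roles strong_tie_nodes (get_strong_tie_distribution roles strong_tie_nodes)

-- ===== LEMMAS AND PROOFS =====

-- Folding `insert` of pairwise-distinct fresh keys appends the corresponding pairs to the items.
theorem pv_items_foldl_insert {ν : Type} (f : String × List Int → ν) :
    ∀ (rs : List (String × List Int)) (d : PySem.Dict String ν),
      d.keys.Nodup → (∀ p ∈ rs, d.contains p.1 = false) → (rs.map Prod.fst).Nodup →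
      (rs.foldl (fun d p => d.insert p.1 (f p)) d).items = d.items ++ rs.map (fun p => (p.1, f p)) := by
  intro rs
  induction rs with
  | nil => intro d _ _ _; simp
  | cons p tl ih =>
    intro d hnd hfree hkeys
    have hpfree : d.contains p.1 = false := hfree p (by simp)
    have hstep : (d.insert p.1 (f p)).items = d.items ++ [(p.1, f p)] :=
      PySem.Dict.items_insert_of_not_contains d (f p) hpfree
    have hnd' : (d.insert p.1 (f p)).keys.Nodup := PySem.Dict.nodup_keys_insert d p.1 (f p) hnd
    have hfree' : ∀ q ∈ tl, (d.insert p.1 (f p)).contains q.1 = false := by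
      intro q hq
      have hqfree : d.contains q.1 = false := hfree q (by simp [hq])
      have hk := List.nodup_cons.mp (by rw [List.map_cons] at hkeys; exact hkeys)
      have hne : q.1 ≠ p.1 := by
        intro h
        exact hk.1 (h ▸ List.mem_map.mpr ⟨q, hq, rfl⟩)
      rw [PySem.Dict.contains_insert]
      simp [hqfree, hne]
    have hkeys' : (tl.map Prod.fst).Nodup := (List.nodup_cons.mp (by rw [List.map_cons] at hkeys; exact hkeys)).2
    have := ih (d.insert p.1 (f p)) hnd' hfree' hkeys'
    simp only [List.foldl_cons, List.map_cons]
    rw [this, hstep]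
    simp
theorem pv_items_foldl_insert_empty {ν : Type} (f : String × List Int → ν)
    (rs : List (String × List Int)) (hkeys : (rs.map Prod.fst).Nodup) :
    (rs.foldl (fun d p => d.insert p.1 (f p)) PySem.Dict.empty).items = rs.map (fun p => (p.1, f p)) := by
  have := pv_items_foldl_insert f rs PySem.Dict.empty
    PySem.Dict.nodup_keys_empty (by intro p _; exact PySem.Dict.contains_empty p.1) hkeys
  simpa using this

-- the dict built by the inner loop of B's strong pass, for one node
theorem pv_inner_keys (rs : List (String × List Int)) (n : Int) :
    ∀ (d : PySem.Dict String Int), (∀ p ∈ rs, p.1 ∈ d.keys) →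
      (rs.foldl (fun d p => if n ∈ p.2 then d.modify p.1 0 (· + 1) else d) d).keys = d.keys := by
  induction rs with
  | nil => intro d _; simp
  | cons p tl ih =>
    intro d hmem
    have hc : d.contains p.1 = true := (PySem.Dict.contains_iff_mem_keys d p.1).mpr (hmem p (by simp))
    have hkeep : (if n ∈ p.2 then d.modify p.1 0 (· + 1) else d).keys = d.keys := by
      split
      · rw [PySem.Dict.keys_modify]; exact PySem.Dict.keys_insert_of_contains d _ hc
      · rfl
    simp only [List.foldl_cons]
    rw [ih _ (by intro q hq; rw [hkeep]; exact hmem q (by simp [hq])), hkeep]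

theorem pv_inner_getD_notmem (n : Int) (r : String) :
    ∀ (rs : List (String × List Int)) (d : PySem.Dict String Int), r ∉ rs.map Prod.fst →
      (rs.foldl (fun d p => if n ∈ p.2 then d.modify p.1 0 (· + 1) else d) d).getD r 0 = d.getD r 0 := by
  intro rs
  induction rs with
  | nil => intro d _; simp
  | cons p tl ih =>
    intro d hnot
    simp only [List.map_cons, List.mem_cons, not_or] at hnot
    have hne : r ≠ p.1 := hnot.1
    simp only [List.foldl_cons]
    rw [ih _ (by simpa using hnot.2)]
    split
    · rw [PySem.Dict.getD_modify]; simp [hne]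
    · rfl

theorem pv_inner_getD (n : Int) (r : String) (ns : List Int) :
    ∀ (rs : List (String × List Int)) (d : PySem.Dict String Int),
      (rs.map Prod.fst).Nodup → (r, ns) ∈ rs →
      (rs.foldl (fun d p => if n ∈ p.2 then d.modify p.1 0 (· + 1) else d) d).getD r 0
        = d.getD r 0 + (if n ∈ ns then (1 : Int) else 0) := by
  intro rs
  induction rs with
  | nil => intro d _ h; simp at h
  | cons p tl ih =>
    intro d hnd hmem
    have hnd' := List.nodup_cons.mp (by rw [List.map_cons] at hnd; exact hnd)
    rcases List.mem_cons.mp hmem with heq | htl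
    · -- p is the pair (r, ns)
      have hr : p.1 = r := by rw [← heq]
      have hns : p.2 = ns := by rw [← heq]
      have hnot : r ∉ tl.map Prod.fst := by rw [← hr]; exact hnd'.1
      simp only [List.foldl_cons]
      rw [pv_inner_getD_notmem n r tl _ hnot]
      subst hr hns
      split
      · rw [PySem.Dict.getD_modify]; simp_all
      · simp_all
    · -- (r, ns) is in the tail; p.1 ≠ r
      have hrtl : r ∈ tl.map Prod.fst := List.mem_map.mpr ⟨(r, ns), htl, rfl⟩
      have hne : r ≠ p.1 := fun h => hnd'.1 (h ▸ hrtl)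
      simp only [List.foldl_cons]
      have hstep : (if n ∈ p.2 then d.modify p.1 0 (· + 1) else d).getD r 0 = d.getD r 0 := by
        split
        · rw [PySem.Dict.getD_modify]; simp [hne]
        · rfl
      rw [ih _ hnd'.2 htl, hstep]

theorem pv_outer_getD (rs : List (String × List Int)) (r : String) (ns : List Int)
    (hnd : (rs.map Prod.fst).Nodup) (hmem : (r, ns) ∈ rs) :
    ∀ (strong : List Int) (d : PySem.Dict String Int), (∀ p ∈ rs, p.1 ∈ d.keys) →
      (strong.foldl (fun d node => rs.foldl
          (fun d p => if node ∈ p.2 then d.modify p.1 0 (· + 1) else d) d) d).getD r 0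
        = d.getD r 0 + ((strong.filter (fun m => decide (m ∈ ns))).length : Int) := by
  intro strong
  induction strong with
  | nil => intro d _; simp
  | cons n tl ih =>
    intro d hk
    have hinner := pv_inner_keys rs n d hk
    simp only [List.foldl_cons]
    rw [ih _ (fun q hq => hinner ▸ hk q hq), pv_inner_getD n r ns rs d hnd hmem]
    by_cases hn : n ∈ ns <;> simp [hn] <;> push_cast <;> ring

theorem pv_outer_keys (rs : List (String × List Int)) :
    ∀ (strong : List Int) (d : PySem.Dict String Int), (∀ p ∈ rs, p.1 ∈ d.keys) →
      (strong.foldl (fun d node => rs.foldl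
          (fun d p => if node ∈ p.2 then d.modify p.1 0 (· + 1) else d) d) d).keys = d.keys := by
  intro strong
  induction strong with
  | nil => intro d _; simp
  | cons n tl ih =>
    intro d hmem
    have hstep := pv_inner_keys rs n d hmem
    simp only [List.foldl_cons]
    rw [ih _ (by intro q hq; rw [hstep]; exact hmem q hq), hstep]

-- items of a nodup-keyed dict are determined by the keys and getD
theorem pv_items_eq_keys_map (d : PySem.Dict String Int) (h : d.keys.Nodup) :
    d.items = d.keys.map (fun k => (k, d.getD k 0)) := by
  have hval : ∀ p ∈ d.items, (p.1, d.getD p.1 0) = p := by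
    intro p hp
    have := PySem.Dict.getD_of_mem_items (d := d) (k := p.1) (v := p.2) (by simpa using hp) h 0
    rw [this]
  show d.items = (d.items.map (fun x => x.1)).map (fun k => (k, d.getD k 0))
  rw [List.map_map]
  conv_lhs => rw [← List.map_id d.items]
  apply List.map_congr_left
  intro p hp
  simpa using (hval p hp).symm

-- the two strong-tie counts agree: |set(ns) ∩ strong| = #{n ∈ strong : n ∈ ns} for nodup strong
theorem pv_count_eq (ns strong : List Int) (h : strong.Nodup) :
    PySem.Set.len (PySem.Set.inter (PySem.Set.ofList ns) strong)
      = ((strong.filter (fun m => decide (m ∈ ns))).length : Int) := by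
  have h1 : (PySem.Set.inter (PySem.Set.ofList ns) strong).Nodup :=
    PySem.Set.nodup_inter _ _ (PySem.Set.nodup_ofList ns)
  have h2 : (strong.filter (fun m => decide (m ∈ ns))).Nodup := h.filter _
  have hperm : (PySem.Set.inter (PySem.Set.ofList ns) strong).Perm
      (strong.filter (fun m => decide (m ∈ ns))) := by
    rw [List.perm_ext_iff_of_nodup h1 h2]
    intro a
    rw [PySem.Set.mem_inter, PySem.Set.mem_ofList]
    simp [List.mem_filter, and_comm]
  simp [PySem.Set.len, hperm.length_eq]

-- ===== VERDICT (by name: the statement is the Claim_ definition above) =====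
theorem get_strong_tie_distribution_spec : Claim_equal_get_strong_tie_distribution := by
  intro roles strong _ hpre
  obtain ⟨hkeys, hstrong⟩ := hpre
  show get_strong_tie_distribution roles strong = get_strong_tie_distribution_alt roles strong
  -- A's single loop over a pair of dicts splits into two independent insert folds
  have hsplit :
      (roles.foldl (fun (acc : PySem.Dict String Int × PySem.Dict String Int) p =>
          (acc.1.insert p.1 (p.2.length : Int),
           acc.2.insert p.1 (PySem.Set.len (PySem.Set.inter (PySem.Set.ofList p.2) strong))))
        (PySem.Dict.empty, PySem.Dict.empty))
      = (roles.foldl (fun (d : PySem.Dict String Int) p => d.insert p.1 (p.2.length : Int)) PySem.Dict.empty,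
         roles.foldl (fun (d : PySem.Dict String Int) p =>
           d.insert p.1 (PySem.Set.len (PySem.Set.inter (PySem.Set.ofList p.2) strong))) PySem.Dict.empty) :=
    PySem.List.foldl_prod_mk
      (fun (d : PySem.Dict String Int) (p : String × List Int) => d.insert p.1 (p.2.length : Int))
      (fun (d : PySem.Dict String Int) (p : String × List Int) =>
        d.insert p.1 (PySem.Set.len (PySem.Set.inter (PySem.Set.ofList p.2) strong)))
      roles PySem.Dict.empty PySem.Dict.empty
  have hA1 : (get_strong_tie_distribution roles strong).1
      = roles.map (fun p => (p.1, (p.2.length : Int))) := by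
    show (roles.foldl (fun (acc : PySem.Dict String Int × PySem.Dict String Int) p =>
          (acc.1.insert p.1 (p.2.length : Int),
           acc.2.insert p.1 (PySem.Set.len (PySem.Set.inter (PySem.Set.ofList p.2) strong))))
        (PySem.Dict.empty, PySem.Dict.empty)).1.items = _
    rw [hsplit]
    exact pv_items_foldl_insert_empty _ roles hkeys
  have hA2 : (get_strong_tie_distribution roles strong).2
      = roles.map (fun p => (p.1, PySem.Set.len (PySem.Set.inter (PySem.Set.ofList p.2) strong))) := by
    show (roles.foldl (fun (acc : PySem.Dict String Int × PySem.Dict String Int) p =>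
          (acc.1.insert p.1 (p.2.length : Int),
           acc.2.insert p.1 (PySem.Set.len (PySem.Set.inter (PySem.Set.ofList p.2) strong))))
        (PySem.Dict.empty, PySem.Dict.empty)).2.items = _
    rw [hsplit]
    exact pv_items_foldl_insert_empty _ roles hkeys
  have hB1 : (get_strong_tie_distribution_alt roles strong).1
      = roles.map (fun p => (p.1, (p.2.length : Int))) :=
    pv_items_foldl_insert_empty _ roles hkeys
  -- B's strong-tie dict
  have hseed_items : (roles.foldl (fun (d : PySem.Dict String Int) p => d.insert p.1 (0 : Int))
      PySem.Dict.empty).items = roles.map (fun p => (p.1, (0 : Int))) :=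
    pv_items_foldl_insert_empty _ roles hkeys
  have hseed_keys : (roles.foldl (fun (d : PySem.Dict String Int) p => d.insert p.1 (0 : Int))
      PySem.Dict.empty).keys = roles.map Prod.fst := by
    show ((roles.foldl (fun (d : PySem.Dict String Int) p => d.insert p.1 (0 : Int))
      PySem.Dict.empty).items.map (fun x => x.1)) = _
    rw [hseed_items, List.map_map]
    rfl
  have hmemkeys : ∀ p ∈ roles, p.1 ∈ (roles.foldl
      (fun (d : PySem.Dict String Int) p => d.insert p.1 (0 : Int)) PySem.Dict.empty).keys := by
    intro p hp
    rw [hseed_keys]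
    exact List.mem_map.mpr ⟨p, hp, rfl⟩
  have hsd_keys : (strong.foldl (fun (d : PySem.Dict String Int) node => roles.foldl
        (fun (d : PySem.Dict String Int) p => if node ∈ p.2 then d.modify p.1 0 (· + 1) else d) d)
      (roles.foldl (fun (d : PySem.Dict String Int) p => d.insert p.1 (0 : Int)) PySem.Dict.empty)).keys
      = roles.map Prod.fst :=
    (pv_outer_keys roles strong _ hmemkeys).trans hseed_keys
  have hB2 : (get_strong_tie_distribution_alt roles strong).2
      = roles.map (fun p => (p.1, ((strong.filter (fun m => decide (m ∈ p.2))).length : Int))) := by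
    show (strong.foldl (fun (d : PySem.Dict String Int) node => roles.foldl
        (fun (d : PySem.Dict String Int) p => if node ∈ p.2 then d.modify p.1 0 (· + 1) else d) d)
      (roles.foldl (fun (d : PySem.Dict String Int) p => d.insert p.1 (0 : Int)) PySem.Dict.empty)).items = _
    rw [pv_items_eq_keys_map _ (hsd_keys ▸ hkeys), hsd_keys, List.map_map]
    apply List.map_congr_left
    intro p hp
    have h0 : (roles.foldl (fun (d : PySem.Dict String Int) p => d.insert p.1 (0 : Int))
        PySem.Dict.empty).getD p.1 0 = 0 :=
      PySem.Dict.getD_of_mem_items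
        (roles.foldl (fun (d : PySem.Dict String Int) p => d.insert p.1 (0 : Int)) PySem.Dict.empty)
        (by rw [hseed_items]; exact List.mem_map.mpr ⟨p, hp, rfl⟩) (hseed_keys ▸ hkeys) 0
    have hcount := pv_outer_getD roles p.1 p.2 hkeys (by simpa using hp) strong _ hmemkeys
    rw [h0, zero_add] at hcount
    simp only [Function.comp]
    rw [hcount]
  have hmaps : roles.map (fun p => (p.1, PySem.Set.len (PySem.Set.inter (PySem.Set.ofList p.2) strong)))
      = roles.map (fun p => (p.1, ((strong.filter (fun m => decide (m ∈ p.2))).length : Int))) :=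
    List.map_congr_left (fun p _ => by rw [pv_count_eq p.2 strong hstrong])
  rw [Prod.ext_iff]
  exact ⟨hA1.trans hB1.symm, hA2.trans (hmaps.trans hB2.symm)⟩
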